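-- pv_equiv track=rewrite | github.com/rei-kaji/wmad-class | assignment10/problem3.py | createDictionary
-- ===== SOURCE A (Python) =====
-- def createDictionary(number):
--     if number > 50:
--
--         numbersDictionary = {
--             2: [],
--             3: [],
--             4: [],
--             5: [],
--             6: [],
--             7: [],
--             8: [],
--             9: []
--         }
--
--         for i in range(2, number + 1):
--             if i % 2 == 0:
--                 numbersDictionary[2].append(i)
--             if i % 3 == 0:
--                 numbersDictionary[3].append(i)
--             if i % 4 == 0:
--                 numbersDictionary[4].append(i)
--             if i % 5 == 0:
--                 numbersDictionary[5].append(i)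
--             if i % 6 == 0:
--                 numbersDictionary[6].append(i)
--             if i % 7 == 0:
--                 numbersDictionary[7].append(i)
--             if i % 8 == 0:
--                 numbersDictionary[8].append(i)
--             if i % 9 == 0:
--                 numbersDictionary[9].append(i)
--
--         return numbersDictionary
--
--     else:
--         return None
-- ===== SOURCE B (Python) =====
-- def createDictionary(number):
--     if number > 50:
--         return {d: list(range(d, number + 1, d)) for d in range(2, 10)}
--     else:
--         return None
-- ===== Notes on version B (the rewrite author's own statement) =====
-- stated objective: faster
-- what changed: Instead of scanning every integer up to number and testing divisibility by each of the eight divisors with modulo branches, B iterates over the divisors and builds each list directly as the arithmetic progression of that divisor's multiples via a stepped range.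
import Mathlib
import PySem

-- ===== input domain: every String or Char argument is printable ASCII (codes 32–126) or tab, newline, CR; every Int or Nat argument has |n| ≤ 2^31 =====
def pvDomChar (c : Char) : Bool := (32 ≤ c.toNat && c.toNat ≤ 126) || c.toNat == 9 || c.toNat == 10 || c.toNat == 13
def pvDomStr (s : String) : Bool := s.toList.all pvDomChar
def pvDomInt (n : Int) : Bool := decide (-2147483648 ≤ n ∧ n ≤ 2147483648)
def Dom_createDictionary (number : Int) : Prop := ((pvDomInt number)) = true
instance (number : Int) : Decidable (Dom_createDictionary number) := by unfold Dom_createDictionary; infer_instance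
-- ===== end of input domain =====

-- B builds each divisor's list directly as an arithmetic sequence range(d, number+1, d)
-- instead of scanning every integer with eight modulo tests (one per-divisor traversal each).

-- ===== PORT A =====

-- one iteration of A's loop body: the eight conditional appends, in order
def pvStepA (d : PySem.Dict Int (List Int)) (i : Int) : PySem.Dict Int (List Int) :=
  let d := if PySem.Int.mod i 2 == 0 then d.modify 2 [] (· ++ [i]) else d
  let d := if PySem.Int.mod i 3 == 0 then d.modify 3 [] (· ++ [i]) else d
  let d := if PySem.Int.mod i 4 == 0 then d.modify 4 [] (· ++ [i]) else d
  let d := if PySem.Int.mod i 5 == 0 then d.modify 5 [] (· ++ [i]) else d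
  let d := if PySem.Int.mod i 6 == 0 then d.modify 6 [] (· ++ [i]) else d
  let d := if PySem.Int.mod i 7 == 0 then d.modify 7 [] (· ++ [i]) else d
  let d := if PySem.Int.mod i 8 == 0 then d.modify 8 [] (· ++ [i]) else d
  let d := if PySem.Int.mod i 9 == 0 then d.modify 9 [] (· ++ [i]) else d
  d

def createDictionary (number : Int) : Option (List (Int × List Int)) :=
  if number > 50 then
    let d0 : PySem.Dict Int (List Int) :=
      PySem.Dict.ofList [(2, []), (3, []), (4, []), (5, []), (6, []), (7, []), (8, []), (9, [])]
    let d := (PySem.List.pyRange 2 (number + 1) 1).foldl pvStepA d0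
    some d.items
  else
    none

-- ===== PORT B =====
def createDictionary_alt (number : Int) : Option (List (Int × List Int)) :=
  if number > 50 then
    some ((PySem.List.pyRange 2 10 1).map (fun d => (d, PySem.List.pyRange d (number + 1) d)))
  else
    none

-- ===== PRECONDITION & SPEC =====
def Spec_createDictionary (number : Int) (out : Option (List (Int × List Int))) : Prop := out = createDictionary_alt number
instance (number : Int) (out : Option (List (Int × List Int))) : Decidable (Spec_createDictionary number out) := by unfold Spec_createDictionary; infer_instance

-- ===== CLAIM (what is proved, stated in full; the proofs are below) =====
def Claim_equal_createDictionary : Prop := ∀ (number : Int), Dom_createDictionary number → Spec_createDictionary number (createDictionary number)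

-- ===== LEMMAS AND PROOFS =====

-- the fixed key list of A's dictionary
def pvKeys : List Int := [2, 3, 4, 5, 6, 7, 8, 9]

-- getD through one conditional modify
lemma getD_condModify (d : PySem.Dict Int (List Int)) (c : Bool) (k k' i : Int) :
    (if c then d.modify k [] (· ++ [i]) else d).getD k' [] =
      d.getD k' [] ++ (if k' = k ∧ c = true then [i] else []) := by
  cases c with
  | false => simp
  | true =>
    rw [if_pos rfl, PySem.Dict.getD_modify]
    split_ifs with h1 h2 h2 <;> simp_all

-- getD through one full iteration of A's loop body
lemma getD_pvStepA (d : PySem.Dict Int (List Int)) (i k : Int) (hk : k ∈ pvKeys) :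
    (pvStepA d i).getD k [] =
      d.getD k [] ++ (if PySem.Int.mod i k == 0 then [i] else []) := by
  unfold pvStepA
  simp only [getD_condModify, List.append_assoc]
  fin_cases hk <;> simp

-- keys are unchanged by one conditional modify at an existing key
lemma keys_condModify (d : PySem.Dict Int (List Int)) (c : Bool) (k i : Int)
    (hk : k ∈ d.keys) : (if c then d.modify k [] (· ++ [i]) else d).keys = d.keys := by
  cases c with
  | false => rfl
  | true =>
    rw [if_pos rfl, PySem.Dict.keys_modify, PySem.Dict.keys_insert_of_contains]
    exact (PySem.Dict.contains_iff_mem_keys d k).mpr hk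

lemma keys_pvStepA (d : PySem.Dict Int (List Int)) (i : Int) (h : d.keys = pvKeys) :
    (pvStepA d i).keys = pvKeys := by
  unfold pvStepA
  have step : ∀ (d : PySem.Dict Int (List Int)) (c : Bool) (k : Int), d.keys = pvKeys →
      k ∈ pvKeys → (if c then d.modify k [] (· ++ [i]) else d).keys = pvKeys := by
    intro d c k hd hk
    rw [keys_condModify d c k i (hd ▸ hk), hd]
  exact step _ _ _ (step _ _ _ (step _ _ _ (step _ _ _ (step _ _ _ (step _ _ _ (step _ _ _
    (step _ _ _ h (by decide)) (by decide)) (by decide)) (by decide)) (by decide))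
    (by decide)) (by decide)) (by decide)

-- loop invariant: keys stay pvKeys and each key accumulates its multiples
lemma foldl_pvStepA (l : List Int) (d : PySem.Dict Int (List Int)) (h : d.keys = pvKeys) :
    (l.foldl pvStepA d).keys = pvKeys ∧
      ∀ k ∈ pvKeys, (l.foldl pvStepA d).getD k [] =
        d.getD k [] ++ l.filter (fun i => PySem.Int.mod i k == 0) := by
  induction l generalizing d with
  | nil => simpa using h
  | cons i l ih =>
    have hk := keys_pvStepA d i h
    obtain ⟨h1, h2⟩ := ih (pvStepA d i) hk
    refine ⟨h1, fun k hkm => ?_⟩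
    rw [List.foldl_cons] at *
    rw [h2 k hkm, getD_pvStepA d i k hkm, List.filter_cons, List.append_assoc]
    by_cases hc : (PySem.Int.mod i k == 0) = true <;> simp [hc]

-- the multiples of k in [2, m) are exactly range(k, m, k)
lemma filter_multiples (k m : Int) (hk : 2 ≤ k) :
    (PySem.List.pyRange 2 m 1).filter (fun i => PySem.Int.mod i k == 0) =
      PySem.List.pyRange k m k := by
  have hkpos : (0:Int) < k := by omega
  have hnd2 : ((PySem.List.pyRange 2 m 1).filter (fun i => PySem.Int.mod i k == 0)).Nodup :=
    (PySem.List.nodup_pyRange_one 2 m).filter _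
  have hpw2 : ((PySem.List.pyRange 2 m 1).filter (fun i => PySem.Int.mod i k == 0)).Pairwise (· < ·) :=
    (PySem.List.pairwise_lt_pyRange_one 2 m).filter _
  have hrep := PySem.List.pyRange_of_pos k m hkpos
  have hndr : (PySem.List.pyRange k m k).Nodup := by
    rw [hrep]
    refine List.Nodup.map ?_ (List.nodup_range)
    intro a b hab
    have : k * (a:Int) = k * b := by
      have h1 : k + k * (a:Int) = k + k * b := hab
      omega
    have := mul_left_cancel₀ (by omega : (k:Int) ≠ 0) this
    exact_mod_cast this
  have hpwr : (PySem.List.pyRange k m k).Pairwise (· < ·) := by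
    rw [hrep]
    refine List.Pairwise.map _ ?_ List.pairwise_lt_range
    intro a b hab
    have : (a:Int) < b := by exact_mod_cast hab
    nlinarith
  refine List.Perm.eq_of_pairwise (fun a b _ _ h1 h2 => by omega) hpw2 hpwr
    ((List.perm_ext_iff_of_nodup hnd2 hndr).mpr ?_)
  intro x
  rw [List.mem_filter, PySem.List.mem_pyRange_one, PySem.List.mem_pyRange_iff_of_pos hkpos]
  constructor
  · rintro ⟨⟨h2, hm⟩, hdvd⟩
    have hdvd : k ∣ x := by
      have := (PySem.Int.mod_eq_zero_iff_dvd x k).mp (by simpa using hdvd)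
      exact this
    exact ⟨Int.le_of_dvd (by omega) hdvd, hm, (dvd_sub_right hdvd).mpr dvd_rfl⟩
  · rintro ⟨hkx, hm, hdvd⟩
    have hdvd : k ∣ x := by
      have h2 : x = (x - k) + k := by ring
      rw [h2]; exact dvd_add hdvd dvd_rfl
    exact ⟨⟨by omega, hm⟩, by simp [PySem.Int.mod_eq_zero_iff_dvd, hdvd]⟩

theorem createDictionary_spec : Claim_equal_createDictionary := by
  intro number _
  unfold Spec_createDictionary
  by_cases h : number > 50
  · simp only [createDictionary, createDictionary_alt, if_pos h]
    obtain ⟨hkeys, hget⟩ := foldl_pvStepA (PySem.List.pyRange 2 (number + 1) 1)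
      (PySem.Dict.ofList [(2, []), (3, []), (4, []), (5, []), (6, []), (7, []), (8, []), (9, [])])
      (by decide)
    have hnd : ((PySem.List.pyRange 2 (number + 1) 1).foldl pvStepA
        (PySem.Dict.ofList [(2, []), (3, []), (4, []), (5, []), (6, []), (7, []), (8, []), (9, [])])).keys.Nodup := by
      rw [hkeys]; decide
    rw [PySem.Dict.items_eq_map_keys _ hnd [], hkeys]
    have hr : PySem.List.pyRange 2 10 1 = pvKeys := by decide
    rw [hr]
    refine congrArg some (List.map_congr_left fun k hk => ?_)
    have h2k : (2:Int) ≤ k := by fin_cases hk <;> decide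
    have hd0 : (PySem.Dict.ofList [((2:Int), ([]:List Int)), (3, []), (4, []), (5, []), (6, []), (7, []), (8, []), (9, [])]).getD k [] = [] := by
      fin_cases hk <;> decide
    rw [hget k hk, hd0, List.nil_append, filter_multiples k (number + 1) h2k]
  · simp [createDictionary, createDictionary_alt, h]
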